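-- pv_equiv track=rewrite | github.com/pypi-data/pypi-mirror-276 | packages/mix-n-match/mix_n_match-0.4.0.tar.gz/mix_n_match-0.4.0/mix_n_match/correlations.py | pair_data
-- ===== SOURCE A (Python) =====
-- import itertools
-- from typing import Dict, Iterable, List, Optional, Union
--
-- def pair_data(
--     iterable: Iterable,
--     method: str = "full",
--     ignore_diagonal: bool = False,
-- ) -> Iterable:
--     """Function pairs items in an iterator.
--
--     :param iterable: iterator of items to pair together
--     :param method: how to pair the data.
--         If `full`, pairs every item with every other item
--         If `lower`, pairs each item with preceeding items (lower triangle)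
--         If `upper`, pairs each item with subsequent items (upper triangular)
--         defaults to `full`
--     :param ignore_diagonal: if `True`, ignores cases where the item is paired
--         with itself. Defaults to `False`
--     :yield: iterable in the form (indices, item1, item2)
--
--     Example:
--         items = iter([0, 1])
--         list(pair_data(items, method="lower", ignore_diagonal=True))
--         >>> [((0, 0), 1, 0)]
--     """
--     iterable_1, iterable_2 = itertools.tee(iterable, 2)
--     for i, item1 in enumerate(iterable_1):
--         iterable_2, next_iter = itertools.tee(iterable_2, 2)
--         for j, item2 in enumerate(iterable_2):
--             if ignore_diagonal and i == j:
--                 continue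
--             if method == "lower" and j > i:
--                 continue
--             if method == "upper" and i > j:
--                 continue
--             yield ((i, j), item1, item2)
--
--         iterable_2 = next_iter
-- ===== SOURCE B (Python) =====
-- import itertools
--
--
-- def pair_data(
--     iterable,
--     method="full",
--     ignore_diagonal=False,
-- ):
--     items = list(iterable)
--     n = len(items)
--     if method == "lower":
--         pairs = ((i, j) for i in range(n) for j in range(i + 1))
--     elif method == "upper":
--         pairs = ((i, j) for i in range(n) for j in range(i, n))
--     else:
--         pairs = itertools.product(range(n), repeat=2)
--     for i, j in pairs:
--         if ignore_diagonal and i == j: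
--             continue
--         yield ((i, j), items[i], items[j])
-- ===== Notes on version B (the rewrite author's own statement) =====
-- stated objective: alternative
-- what changed: B materializes the iterable once, generates the method-appropriate index pairs directly (lower: j<=i, upper: j>=i, full: product) and indexes into the list, instead of A's tee-based re-scanning of the iterator with continue-filtering of every (i,j) pair.
import Mathlib
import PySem

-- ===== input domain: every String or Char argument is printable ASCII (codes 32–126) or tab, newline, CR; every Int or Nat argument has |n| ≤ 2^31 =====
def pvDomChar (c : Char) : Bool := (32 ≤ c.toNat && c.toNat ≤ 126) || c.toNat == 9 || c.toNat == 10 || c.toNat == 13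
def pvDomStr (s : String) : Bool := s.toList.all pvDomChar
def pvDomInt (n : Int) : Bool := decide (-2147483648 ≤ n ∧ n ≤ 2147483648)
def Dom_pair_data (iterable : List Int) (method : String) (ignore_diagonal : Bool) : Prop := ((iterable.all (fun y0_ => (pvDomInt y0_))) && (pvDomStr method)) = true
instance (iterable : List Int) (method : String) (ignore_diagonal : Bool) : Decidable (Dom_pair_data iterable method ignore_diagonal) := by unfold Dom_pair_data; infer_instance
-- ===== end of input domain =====

-- B generates the method-appropriate index pairs directly and indexes into the
-- materialized list, instead of A's tee-based re-scan with continue-filters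
-- (alternative decomposition; return value only — both Pythons are generators).

-- ===== PORT A =====
-- A enumerates the teed iterators; we enumerate the list by zipping it with its index range.
def pair_data (iterable : List Int) (method : String) (ignore_diagonal : Bool) : List ((Int × Int) × Int × Int) :=
  ((List.range iterable.length).zip iterable).flatMap (fun p1 =>
    ((List.range iterable.length).zip iterable).filterMap (fun p2 =>
      if ignore_diagonal && p1.1 == p2.1 then none
      else if method == "lower" && decide (p2.1 > p1.1) then none
      else if method == "upper" && decide (p1.1 > p2.1) then none
      else some ((Int.ofNat p1.1, Int.ofNat p2.1), p1.2, p2.2)))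

-- ===== PORT B =====
-- B's index-pair stream per method (range(i, n) ported exactly as List.range' i (n - i)).
def pair_data_alt (iterable : List Int) (method : String) (ignore_diagonal : Bool) : List ((Int × Int) × Int × Int) :=
  let items := iterable
  let n := items.length
  let pairs : List (Nat × Nat) :=
    if method == "lower" then
      (List.range n).flatMap (fun i => (List.range (i + 1)).map (fun j => (i, j)))
    else if method == "upper" then
      (List.range n).flatMap (fun i => (List.range' i (n - i)).map (fun j => (i, j)))
    else
      (List.range n).flatMap (fun i => (List.range n).map (fun j => (i, j)))
  pairs.filterMap (fun p =>
    if ignore_diagonal && p.1 == p.2 then none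
    else some ((Int.ofNat p.1, Int.ofNat p.2), items[p.1]!, items[p.2]!))

-- ===== PRECONDITION & SPEC =====
def Spec_pair_data (iterable : List Int) (method : String) (ignore_diagonal : Bool) (out : List ((Int × Int) × Int × Int)) : Prop := out = pair_data_alt iterable method ignore_diagonal
instance (iterable : List Int) (method : String) (ignore_diagonal : Bool) (out : List ((Int × Int) × Int × Int)) : Decidable (Spec_pair_data iterable method ignore_diagonal out) := by unfold Spec_pair_data; infer_instance

-- ===== CLAIM (what is proved, stated in full; the proofs are below) =====
def Claim_equal_pair_data : Prop := ∀ (iterable : List Int) (method : String) (ignore_diagonal : Bool), Dom_pair_data iterable method ignore_diagonal → Spec_pair_data iterable method ignore_diagonal (pair_data iterable method ignore_diagonal)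

-- ===== LEMMAS AND PROOFS =====

-- enumeration by zip equals enumeration by index lookup
theorem pv_zip_range_eq (xs : List Int) :
    (List.range xs.length).zip xs = (List.range xs.length).map (fun j => (j, xs[j]!)) := by
  apply List.ext_getElem
  · simp
  · intro i h1 h2
    simp at h1 ⊢
    simp [List.getElem!_eq_getElem?_getD, h1]

theorem pv_filterMap_range_cut {β : Type} (n i : ℕ) (hi : i < n) (f : ℕ → Option β)
    (hf : ∀ j, i < j → f j = none) :
    (List.range n).filterMap f = (List.range (i + 1)).filterMap f := by
  have hsplit : List.range (i + 1) ++ List.range' (i + 1) (n - (i + 1)) = List.range n := by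
    rw [List.range_eq_range', List.range_eq_range']
    have h := @List.range'_append 0 (i + 1) (n - (i + 1)) 1
    simp only [one_mul, Nat.zero_add] at h
    rw [h]; congr 1; omega
  rw [← hsplit, List.filterMap_append]
  have : (List.range' (i + 1) (n - (i + 1))).filterMap f = [] := by
    rw [List.filterMap_eq_nil_iff]
    intro a ha
    exact hf a (by have := List.mem_range'.1 ha; omega)
  simp [this]

theorem pv_filterMap_range_drop {β : Type} (n i : ℕ) (hi : i < n) (f : ℕ → Option β)
    (hf : ∀ j, j < i → f j = none) :
    (List.range n).filterMap f = (List.range' i (n - i)).filterMap f := by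
  have hsplit : List.range i ++ List.range' i (n - i) = List.range n := by
    rw [List.range_eq_range', List.range_eq_range']
    have h := @List.range'_append 0 i (n - i) 1
    simp only [one_mul, Nat.zero_add] at h
    rw [h]; congr 1; omega
  rw [← hsplit, List.filterMap_append]
  have : (List.range i).filterMap f = [] := by
    rw [List.filterMap_eq_nil_iff]
    intro a ha
    exact hf a (List.mem_range.1 ha)
  simp [this]

-- ===== VERDICT (by name: the statement is the Claim_ definition above) =====
theorem pair_data_spec : Claim_equal_pair_data := by
  intro xs method ign _
  show pair_data xs method ign = pair_data_alt xs method ign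
  unfold pair_data pair_data_alt
  rw [pv_zip_range_eq]
  simp only [List.flatMap_map, List.filterMap_map]
  by_cases hl : method = "lower"
  · subst hl
    rw [if_pos (by decide)]
    rw [List.filterMap_flatMap]
    apply List.flatMap_congr
    intro i hi
    have hi' := List.mem_range.1 hi
    rw [List.filterMap_map]
    rw [pv_filterMap_range_cut xs.length i hi']
    · apply List.filterMap_congr
      intro j hj
      have hji : ¬ (i < j) := by have := List.mem_range.1 hj; omega
      simp [hji]
    · intro j hij
      simp [hij]
  · by_cases hu : method = "upper"
    · subst hu
      rw [if_neg (show ¬ ((("upper" : String) == "lower") = true) by decide),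
        if_pos (by decide)]
      rw [List.filterMap_flatMap]
      apply List.flatMap_congr
      intro i hi
      have hi' := List.mem_range.1 hi
      rw [List.filterMap_map]
      rw [pv_filterMap_range_drop xs.length i hi']
      · apply List.filterMap_congr
        intro j hj
        have hji : ¬ (j < i) := by have := List.mem_range'.1 hj; omega
        simp [hji, show (("upper" : String) == "lower") = false by decide]
      · intro j hij
        simp [hij, show (("upper" : String) == "lower") = false by decide]
    · have hl' : (method == "lower") = false := by simpa using hl
      have hu' : (method == "upper") = false := by simpa using hu
      rw [if_neg (by simp [hl']), if_neg (by simp [hu'])]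
      rw [List.filterMap_flatMap]
      apply List.flatMap_congr
      intro i hi
      rw [List.filterMap_map]
      apply List.filterMap_congr
      intro j hj
      simp [hl', hu']
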